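-- pv_equiv track=rewrite | github.com/morganizwd/poetry | llm_poetry_tools.py | _column_width_for_field
-- ===== SOURCE A (Python) =====
-- from typing import Any, Dict, List, Optional, Sequence
--
-- def _column_width_for_field(fieldname: str, values: Sequence[Any]) -> float:
--     """Pick a practical Excel column width."""
--
--     lowered = fieldname.lower()
--     if lowered == "poem_text":
--         return 42
--     if lowered in {"llm_comment", "llm_raw_response"}:
--         return 36
--     if lowered.startswith("line_"):
--         return 28
--     if lowered.endswith("_path"):
--         return 32
--
--     sample_lengths = [len(str(value)) for value in values if value not in ("", None)]
--     header_len = len(fieldname)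
--     if sample_lengths:
--         sample_lengths.sort()
--         percentile_index = int((len(sample_lengths) - 1) * 0.75)
--         typical_len = sample_lengths[percentile_index]
--         return max(12, min(24, max(header_len, typical_len + 2)))
--     return max(12, min(20, header_len + 2))
-- ===== SOURCE B (Python) =====
-- _FIXED_WIDTHS = {"poem_text": 42, "llm_comment": 36, "llm_raw_response": 36}
--
--
-- def _quickselect(xs, k):
--     """0-based k-th smallest via three-way-partition quickselect (middle pivot), expected O(n)."""
--     while True:
--         p = xs[len(xs) // 2]
--         lo = [x for x in xs if x < p]
--         hi = [x for x in xs if x > p]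
--         if k < len(lo):
--             xs = lo
--         elif k < len(xs) - len(hi):
--             return p
--         else:
--             k -= len(xs) - len(hi)
--             xs = hi
--
--
-- def _column_width_for_field(fieldname, values):
--     lowered = fieldname.lower()
--     fixed = _FIXED_WIDTHS.get(lowered)
--     if fixed is not None:
--         return fixed
--     if lowered.startswith("line_"):
--         return 28
--     if lowered.endswith("_path"):
--         return 32
--     header_len = len(fieldname)
--     lengths = [len(str(v)) for v in values if v not in ("", None)]
--     if not lengths:
--         return max(12, min(20, header_len + 2))
--     k = 3 * (len(lengths) - 1) // 4
--     return max(12, min(24, max(header_len, _quickselect(lengths, k) + 2)))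
-- ===== Notes on version B (the rewrite author's own statement) =====
-- stated objective: alternative
-- what changed: B selects the 75th-percentile length with a three-way-partition quickselect instead of fully sorting the length list, and replaces the fixed-width if-chain by a dict lookup.
import Mathlib
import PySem

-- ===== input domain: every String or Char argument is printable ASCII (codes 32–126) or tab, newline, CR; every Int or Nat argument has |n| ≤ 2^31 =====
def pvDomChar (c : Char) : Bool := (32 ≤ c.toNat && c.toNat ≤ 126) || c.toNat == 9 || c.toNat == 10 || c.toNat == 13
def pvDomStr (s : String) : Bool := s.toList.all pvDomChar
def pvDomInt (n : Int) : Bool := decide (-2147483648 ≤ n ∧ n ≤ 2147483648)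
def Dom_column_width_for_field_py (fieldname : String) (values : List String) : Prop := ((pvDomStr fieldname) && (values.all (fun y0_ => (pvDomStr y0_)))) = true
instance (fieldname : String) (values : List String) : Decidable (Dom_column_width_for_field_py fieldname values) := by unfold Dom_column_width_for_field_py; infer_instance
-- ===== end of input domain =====

-- B replaces A's full sort + positional index by a three-way-partition quickselect of the same
-- order statistic, and A's fixed-width if-chain by one dict lookup (alternative algorithm, same value).

-- ===== PORT A =====
-- int((n-1)*0.75) is ported by hand as 3*(n-1)/4 (Nat division): exact, because 0.75 and the
-- product (n-1)*0.75 = 3*(n-1)/4 are exact in binary floating point and int() truncates toward zero.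
def column_width_for_field_py (fieldname : String) (values : List String) : Int :=
  let lowered := PySem.Str.lower fieldname
  if lowered == "poem_text" then 42
  else if lowered == "llm_comment" || lowered == "llm_raw_response" then 36
  else if PySem.Str.startswith lowered "line_" then 28
  else if PySem.Str.endswith lowered "_path" then 32
  else
    let sample_lengths := (values.filter (fun v => !(v == ""))).map PySem.Str.len
    let header_len := PySem.Str.len fieldname
    if sample_lengths ≠ [] then
      let sortedL := PySem.List.sorted sample_lengths (fun x => x) false
      let percentile_index := 3 * (sample_lengths.length - 1) / 4
      let typical_len := sortedL.getD percentile_index 0  -- index is always in range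
      max 12 (min 24 (max header_len (typical_len + 2)))
    else max 12 (min 20 (header_len + 2))

-- ===== PORT B =====
def pvFixedWidths : PySem.Dict String Int :=
  PySem.Dict.ofList [("poem_text", 42), ("llm_comment", 36), ("llm_raw_response", 36)]

-- the while-loop of Source B's _quickselect as tail recursion over the shrinking list
def pvQuickselect (xs : List Int) (k : Nat) : Int :=
  if hxs : xs = [] then 0  -- unreachable: only called with xs ≠ []
  else
    let p := xs.getD (xs.length / 2) 0
    let lo := xs.filter (fun x => x < p)
    let hi := xs.filter (fun x => p < x)
    if k < lo.length then pvQuickselect lo k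
    else if k < xs.length - hi.length then p
    else pvQuickselect hi (k - (xs.length - hi.length))
termination_by xs.length
decreasing_by
  · have h2 : xs.length / 2 < xs.length := by
      have := List.length_pos_of_ne_nil hxs; omega
    have hpm : xs.getD (xs.length / 2) 0 ∈ xs := by
      rw [List.getD_eq_getElem xs 0 h2]; exact List.getElem_mem h2
    simp only [List.length_unattach]
    rw [← List.countP_eq_length_filter,
      List.countP_attach (p := fun x => decide (x < xs.getD (xs.length / 2) 0)),
      List.countP_eq_length_filter]
    exact List.length_filter_lt_length_iff_exists.2 ⟨_, hpm, by simp⟩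
  · have h2 : xs.length / 2 < xs.length := by
      have := List.length_pos_of_ne_nil hxs; omega
    have hpm : xs.getD (xs.length / 2) 0 ∈ xs := by
      rw [List.getD_eq_getElem xs 0 h2]; exact List.getElem_mem h2
    simp only [List.length_unattach]
    rw [← List.countP_eq_length_filter,
      List.countP_attach (p := fun x => decide (xs.getD (xs.length / 2) 0 < x)),
      List.countP_eq_length_filter]
    exact List.length_filter_lt_length_iff_exists.2 ⟨_, hpm, by simp⟩


def column_width_for_field_py_alt (fieldname : String) (values : List String) : Int :=
  let lowered := PySem.Str.lower fieldname
  match pvFixedWidths.get? lowered with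
  | some fixed => fixed
  | none =>
    if PySem.Str.startswith lowered "line_" then 28
    else if PySem.Str.endswith lowered "_path" then 32
    else
      let header_len := PySem.Str.len fieldname
      let lengths := (values.filter (fun v => !(v == ""))).map PySem.Str.len
      if lengths = [] then max 12 (min 20 (header_len + 2))
      else
        let k := 3 * (lengths.length - 1) / 4
        max 12 (min 24 (max header_len (pvQuickselect lengths k + 2)))

-- ===== PRECONDITION & SPEC =====
def Spec_column_width_for_field_py (fieldname : String) (values : List String) (out : Int) : Prop := out = column_width_for_field_py_alt fieldname values
instance (fieldname : String) (values : List String) (out : Int) : Decidable (Spec_column_width_for_field_py fieldname values out) := by unfold Spec_column_width_for_field_py; infer_instance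

-- ===== CLAIM (what is proved, stated in full; the proofs are below) =====
def Claim_equal_column_width_for_field_py : Prop := ∀ (fieldname : String) (values : List String), Dom_column_width_for_field_py fieldname values → Spec_column_width_for_field_py fieldname values (column_width_for_field_py fieldname values)

-- ===== LEMMAS AND PROOFS =====

theorem pv_partition3 (p : Int) (l : List Int) :
    l.Perm (l.filter (fun x => x < p) ++ l.filter (fun x => x = p) ++ l.filter (fun x => p < x)) := by
  induction l with
  | nil => simp
  | cons a l ih =>
    rcases lt_trichotomy a p with h | h | h
    · simpa [List.filter_cons, h, not_lt.2 h.le, h.ne] using ih.cons a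
    · subst h
      simp only [List.filter_cons, lt_irrefl, decide_false, if_neg, decide_true, if_pos,
        Bool.false_eq_true, not_false_eq_true]
      refine (ih.cons a).trans ?_
      simpa [List.append_assoc] using (List.perm_middle (a := a)
        (l₁ := l.filter (fun x => decide (x < a)))
        (l₂ := l.filter (fun x => decide (x = a)) ++ l.filter (fun x => decide (a < x)))).symm
    · have hne : ¬ (a = p) := (ne_of_gt h)
      simp only [List.filter_cons, h, not_lt.2 h.le, hne, decide_false, decide_true,
        Bool.false_eq_true, not_false_eq_true, reduceIte, if_neg]
      refine (ih.cons a).trans ?_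
      simpa [List.append_assoc] using (List.perm_middle (a := a)
        (l₁ := l.filter (fun x => decide (x < p)) ++ l.filter (fun x => decide (x = p)))
        (l₂ := l.filter (fun x => decide (p < x)))).symm

theorem pv_quickselect_eq_sorted (xs : List Int) (k : Nat) (hk : k < xs.length) :
    pvQuickselect xs k = (PySem.List.sorted xs (fun x => x) false).getD k 0 := by
  induction hn : xs.length using Nat.strong_induction_on generalizing xs k with
  | _ n IH =>
  subst hn
  have hxs : xs ≠ [] := by rintro rfl; simp at hk
  have h2 : xs.length / 2 < xs.length := by have := List.length_pos_of_ne_nil hxs; omega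
  set p := xs.getD (xs.length / 2) 0 with hp
  set lo := xs.filter (fun x => x < p) with hlo
  set eqs := xs.filter (fun x => x = p) with heqs
  set hi := xs.filter (fun x => p < x) with hhi
  have hperm : xs.Perm (lo ++ eqs ++ hi) := pv_partition3 p xs
  have hpmem : p ∈ xs := by rw [hp, List.getD_eq_getElem xs 0 h2]; exact List.getElem_mem h2
  have hpeqs : p ∈ eqs := by simp [heqs, List.mem_filter, hpmem]
  have hlen : lo.length + eqs.length + hi.length = xs.length := by
    have := hperm.length_eq; simp at this; omega
  have heqspos : 0 < eqs.length := List.length_pos_of_mem hpeqs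
  set slo := PySem.List.sorted lo (fun x => x) false with hslo
  set shi := PySem.List.sorted hi (fun x => x) false with hshi
  have hlslo : slo.length = lo.length := PySem.List.length_sorted ..
  have hlshi : shi.length = hi.length := PySem.List.length_sorted ..
  set ys := slo ++ eqs ++ shi with hys
  have hysperm : ys.Perm xs := by
    have h1 : slo.Perm lo := PySem.List.sorted_perm ..
    have h3 : shi.Perm hi := PySem.List.sorted_perm ..
    exact (((h1.append (List.Perm.refl eqs)).append h3)).trans hperm.symm
  have hmemlo : ∀ x ∈ slo, x < p := by
    intro x hx
    have hx' : x ∈ lo := (PySem.List.mem_sorted _ _ _ _).1 hx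
    rw [hlo, List.mem_filter] at hx'
    simpa using hx'.2
  have hmemeqs : ∀ x ∈ eqs, x = p := by
    intro x hx
    rw [heqs, List.mem_filter] at hx
    simpa using hx.2
  have hmemhi : ∀ x ∈ shi, p < x := by
    intro x hx
    have hx' : x ∈ hi := (PySem.List.mem_sorted _ _ _ _).1 hx
    rw [hhi, List.mem_filter] at hx'
    simpa using hx'.2
  have hpair : ys.Pairwise (fun a b => a ≤ b) := by
    rw [hys, List.pairwise_append, List.pairwise_append]
    refine ⟨⟨by simpa using PySem.List.sorted_pairwise (xs := lo) (key := fun x => x), ?_, ?_⟩,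
      by simpa using PySem.List.sorted_pairwise (xs := hi) (key := fun x => x), ?_⟩
    · refine List.pairwise_of_forall_mem_list ?_
      intro a ha b hb
      have h1 := hmemeqs a ha; have h2 := hmemeqs b hb
      omega
    · intro a ha b hb; have h1 := hmemlo a ha; have h2 := hmemeqs b hb; omega
    · intro a ha b hb
      rcases List.mem_append.1 ha with ha | ha
      · exact ((hmemlo a ha).trans (hmemhi b hb)).le
      · exact (hmemeqs a ha).le.trans (hmemhi b hb).le
  have hsorted : PySem.List.sorted xs (fun x => x) false = ys :=
    PySem.List.sorted_id_eq_of_perm_of_pairwise _ _ hysperm hpair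
  rw [pvQuickselect, dif_neg hxs]
  simp only [← hp, ← hlo, ← hhi]
  rw [hsorted]
  split_ifs with c1 c2
  · -- k < lo.length
    have hlolt : lo.length < xs.length := by omega
    rw [IH lo.length hlolt lo k c1 rfl]
    rw [hys, List.append_assoc, List.getD_append _ _ _ _ (by omega)]
  · -- p case
    have hk2 : lo.length ≤ k := not_lt.1 c1
    have hkin : k - lo.length < eqs.length := by omega
    rw [hys, List.append_assoc, List.getD_append_right slo (eqs ++ shi) 0 k (by omega),
      List.getD_append eqs shi 0 (k - slo.length) (by omega)]
    have : eqs.getD (k - slo.length) 0 ∈ eqs := by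
      rw [List.getD_eq_getElem eqs 0 (by omega)]; exact List.getElem_mem (by omega)
    exact (hmemeqs _ this).symm
  · -- hi case
    have hhilt : hi.length < xs.length := by omega
    have hk3 : k - (xs.length - hi.length) < hi.length := by omega
    rw [IH hi.length hhilt hi _ hk3 rfl]
    rw [hys, List.append_assoc, List.getD_append_right slo (eqs ++ shi) 0 k (by omega),
      List.getD_append_right eqs shi 0 (k - slo.length) (by omega)]
    congr 1
    omega

-- B's dict lookup, written out as A's equality chain
theorem pvFixedWidths_get (s : String) :
    pvFixedWidths.get? s =
      if s == "poem_text" then some 42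
      else if s == "llm_comment" || s == "llm_raw_response" then some 36
      else none := by
  have h : pvFixedWidths.items
      = [("poem_text", (42:Int)), ("llm_comment", 36), ("llm_raw_response", 36)] := by decide
  by_cases h1 : s = "poem_text"
  · subst h1; decide
  by_cases h2 : s = "llm_comment"
  · subst h2; decide
  by_cases h3 : s = "llm_raw_response"
  · subst h3; decide
  have e1 : (("poem_text", (42:Int)).1 == s) = false := beq_eq_false_iff_ne.2 (Ne.symm h1)
  have e2 : (("llm_comment", (36:Int)).1 == s) = false := beq_eq_false_iff_ne.2 (Ne.symm h2)
  have e3 : (("llm_raw_response", (36:Int)).1 == s) = false := beq_eq_false_iff_ne.2 (Ne.symm h3)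
  simp only [PySem.Dict.get?, h, List.find?, e1, e2, e3, beq_iff_eq, h1, if_false,
    Option.map_none]
  simp [h2, h3]

-- ===== VERDICT (by name: the statement is the Claim_ definition above) =====
theorem column_width_for_field_py_spec : Claim_equal_column_width_for_field_py := by
  intro fieldname values _dom
  unfold Spec_column_width_for_field_py column_width_for_field_py column_width_for_field_py_alt
  simp only [pvFixedWidths_get]
  by_cases h1 : (PySem.Str.lower fieldname == "poem_text") = true
  · simp [h1]
  by_cases h2 : (PySem.Str.lower fieldname == "llm_comment"
      || PySem.Str.lower fieldname == "llm_raw_response") = true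
  · simp [h1, h2]
  simp only [Bool.not_eq_true] at h1 h2
  simp only [h1, h2, Bool.false_eq_true, if_false]
  split_ifs with hs he h3 h4
  · rfl
  · rfl
  · have hk : 3 * (((values.filter (fun v => !(v == ""))).map PySem.Str.len).length - 1) / 4
        < ((values.filter (fun v => !(v == ""))).map PySem.Str.len).length := by
      have h0 : ((values.filter (fun v => !(v == ""))).map PySem.Str.len).length ≠ 0 :=
        fun h0 => h3 (List.eq_nil_of_length_eq_zero h0)
      omega
    rw [pv_quickselect_eq_sorted _ _ hk]
  · rfl
  · exact absurd (not_not.1 h3) h4
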